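-- pv_equiv track=rewrite | github.com/o-henry/ps | baekjoon/3507.py | solution
-- ===== SOURCE A (Python) =====
-- def solution(n):
--     li = []
--     i = 1
--     m = n // 2
--
--     if m > 100:
--         return 0
--     elif n - 2*m == 0:
--         li.append([m, m])
--
--     while m < 100:
--         m += i
--
--         if m < 100 and n - m < 100:
--             li.append([m, n-m])
--             li.append([n-m, m])
--         else:
--             break
--
--     return len(li)
-- ===== SOURCE B (Python) =====
-- def solution(n):
--     m0 = n // 2
--     if m0 > 100:
--         return 0
--     return (1 - n % 2) + 2 * max(0, 99 - m0)
-- ===== Notes on version B (the rewrite author's own statement) =====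
-- stated objective: simpler
-- what changed: Replaces the pair-list-building while loop with a constant-time arithmetic closed form: a parity term plus twice a clamped count of the remaining values below the bound.
import Mathlib
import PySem

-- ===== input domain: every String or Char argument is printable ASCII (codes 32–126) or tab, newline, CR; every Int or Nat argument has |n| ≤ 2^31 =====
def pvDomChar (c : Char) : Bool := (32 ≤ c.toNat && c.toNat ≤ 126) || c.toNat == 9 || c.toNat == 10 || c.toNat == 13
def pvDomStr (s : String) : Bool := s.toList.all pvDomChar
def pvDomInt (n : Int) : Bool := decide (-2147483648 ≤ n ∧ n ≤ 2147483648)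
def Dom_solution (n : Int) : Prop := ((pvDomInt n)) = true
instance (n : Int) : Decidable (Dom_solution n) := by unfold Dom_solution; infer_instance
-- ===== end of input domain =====

-- B replaces A's pair-list-building while loop by an O(1) closed-form count (faster).

-- ===== PORT A =====
-- the while loop of A: appends [m, n-m] and [n-m, m] while the conditions hold
def solutionLoop (n m : Int) (li : List (List Int)) : List (List Int) :=
  if _h : m < 100 then
    if m + 1 < 100 ∧ n - (m + 1) < 100 then
      solutionLoop n (m + 1) (li ++ [[m + 1, n - (m + 1)], [n - (m + 1), m + 1]])
    else li
  else li
termination_by (100 - m).toNat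
decreasing_by omega

def solution (n : Int) : Int :=
  let m := PySem.Int.floordiv n 2
  if m > 100 then 0
  else
    let li : List (List Int) := if n - 2 * m = 0 then [[m, m]] else []
    ((solutionLoop n m li).length : Int)

-- ===== PORT B =====
def solution_alt (n : Int) : Int :=
  let m0 := PySem.Int.floordiv n 2
  if m0 > 100 then 0
  else (1 - PySem.Int.mod n 2) + 2 * max 0 (99 - m0)

-- ===== PRECONDITION & SPEC =====
def Spec_solution (n : Int) (out : Int) : Prop := out = solution_alt n
instance (n : Int) (out : Int) : Decidable (Spec_solution n out) := by unfold Spec_solution; infer_instance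

-- ===== CLAIM (what is proved, stated in full; the proofs are below) =====
def Claim_equal_solution : Prop := ∀ (n : Int), Dom_solution n → Spec_solution n (solution n)

-- ===== LEMMAS AND PROOFS =====

-- loop length: from any m with n ≤ 2*m + 1 and m ≤ 99, the loop adds exactly 2*(99 - m) pairs
theorem solutionLoop_length (n : Int) :
    ∀ (k : Nat) (m : Int) (li : List (List Int)), (99 - m).toNat = k → n ≤ 2 * m + 1 → m ≤ 99 →
      (solutionLoop n m li).length = li.length + 2 * k := by
  intro k
  induction k with
  | zero =>
    intro m li hk hn hm
    have hm99 : m = 99 := by omega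
    subst hm99
    rw [solutionLoop]
    simp
  | succ j ih =>
    intro m li hk hn hm
    have h1 : m < 99 := by omega
    rw [solutionLoop]
    have hc : m + 1 < 100 ∧ n - (m + 1) < 100 := by constructor <;> omega
    rw [dif_pos (by omega : m < 100), if_pos hc]
    rw [ih (m + 1) _ (by omega) (by omega) (by omega)]
    simp
    omega

-- ===== VERDICT (by name: the statement is the Claim_ definition above) =====
theorem solution_spec : Claim_equal_solution := by
  intro n _
  unfold Spec_solution solution solution_alt
  have hdm : PySem.Int.floordiv n 2 * 2 + PySem.Int.mod n 2 = n := PySem.Int.floordiv_mul_add_mod n 2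
  have hm0 : 0 ≤ PySem.Int.mod n 2 := PySem.Int.mod_nonneg (a := n) (by norm_num)
  have hm2 : PySem.Int.mod n 2 < 2 := PySem.Int.mod_lt (a := n) (by norm_num)
  dsimp only
  generalize hq : PySem.Int.floordiv n 2 = m at hdm ⊢
  generalize hr : PySem.Int.mod n 2 = r at hdm hm0 hm2 ⊢
  by_cases hgt : m > 100
  · rw [if_pos hgt, if_pos hgt]
  · rw [if_neg hgt, if_neg hgt]
    by_cases hcase : m = 100
    · -- loop does not run: m < 100 is false
      subst hcase
      rw [solutionLoop]
      rw [dif_neg (by omega : ¬ (100:Int) < 100)]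
      by_cases hev : n - 2 * 100 = 0
      · rw [if_pos hev]; simp; omega
      · rw [if_neg hev]; simp; omega
    · have hle : m ≤ 99 := by omega
      by_cases hev : n - 2 * m = 0
      · rw [if_pos hev]
        rw [solutionLoop_length n (99 - m).toNat m [[m, m]] rfl (by omega) hle]
        simp; omega
      · rw [if_neg hev]
        rw [solutionLoop_length n (99 - m).toNat m [] rfl (by omega) hle]
        simp; omega
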